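-- pv_equiv track=rewrite | github.com/JohannesBuchner/BXA | bxa/xspec/gof.py | group_adapt
-- ===== SOURCE A (Python) =====
-- def group_adapt(data, nmin = 10):
-- 	i = 0
-- 	while i < len(data):
-- 		#print ' ',i,'--',len(data)
-- 		for j in range(i + 1, len(data) + 1):
-- 			#print ' ',i,j
-- 			if sum(data[i:j + 1]) >= nmin or j + 1 >= len(data):
-- 				yield (i,j + 1)
-- 				#print '  groups', i,j
-- 				break
-- 		i = j + 1
-- ===== SOURCE B (Python) =====
-- def group_adapt(data, nmin = 10):
--     # Same grouping as A, but the window sum is maintained incrementally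
--     # (O(n) total) instead of re-summing the slice at every inner step.
--     n = len(data)
--     i = 0
--     while i < n:
--         s = data[i]
--         j = i + 1
--         while j + 1 < n and s + data[j] < nmin:
--             s += data[j]
--             j += 1
--         yield (i, j + 1)
--         i = j + 1
-- ===== Notes on version B (the rewrite author's own statement) =====
-- stated objective: faster
-- what changed: B keeps a running window sum that is updated incrementally as the window grows, instead of re-summing the whole slice data[i:j+1] at every inner step, turning the quadratic re-summation into a single linear pass.
import Mathlib
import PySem

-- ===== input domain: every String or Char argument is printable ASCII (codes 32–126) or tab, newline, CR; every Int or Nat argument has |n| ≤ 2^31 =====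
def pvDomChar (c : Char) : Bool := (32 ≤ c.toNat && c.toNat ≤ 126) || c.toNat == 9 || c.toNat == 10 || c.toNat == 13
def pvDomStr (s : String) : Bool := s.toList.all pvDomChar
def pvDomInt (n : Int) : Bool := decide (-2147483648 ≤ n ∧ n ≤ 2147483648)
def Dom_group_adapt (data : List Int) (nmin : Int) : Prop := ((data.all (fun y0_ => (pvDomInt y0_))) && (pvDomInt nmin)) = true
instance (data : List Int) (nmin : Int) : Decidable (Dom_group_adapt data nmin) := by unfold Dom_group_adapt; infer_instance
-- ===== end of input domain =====

-- B re-implements A's grouping with an incrementally maintained window sum (one linear pass)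
-- instead of re-summing the slice at every inner step; return-value equivalence is proved
-- (both Pythons are generators; the value compared is the list of yielded pairs).

-- ===== PORT A =====
-- inner 'for j in range(i+1, len(data)+1): if sum(data[i:j+1]) >= nmin or j+1 >= len(data): break'
-- returns the j at which the loop breaks (none = loop exhausted, which never happens on a nonempty range)
def groupA_find (data : List Int) (nmin : Int) (i : Int) (js : List Int) : Option Int :=
  match js with
  | [] => none
  | j :: rest =>
    if (PySem.List.slice data (some i) (some (j + 1))).sum ≥ nmin ∨ j + 1 ≥ (data.length : Int)
    then some j
    else groupA_find data nmin i rest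

-- needed by the termination argument of the outer while-loop below
theorem groupA_find_mem (data : List Int) (nmin : Int) (i : Int) (js : List Int) (j : Int)
    (h : groupA_find data nmin i js = some j) : j ∈ js := by
  induction js with
  | nil => simp [groupA_find] at h
  | cons a rest ih =>
    unfold groupA_find at h
    by_cases hc : (PySem.List.slice data (some i) (some (a + 1))).sum ≥ nmin ∨ a + 1 ≥ (data.length : Int)
    · simp [hc] at h; simp [h]
    · simp [hc] at h; exact List.mem_cons_of_mem _ (ih h)

-- outer 'while i < len(data)' loop of A
def group_adapt_go (data : List Int) (nmin : Int) (i : Int) : List (List Int) :=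
  if _h : i < (data.length : Int) then
    match _hf : groupA_find data nmin i (PySem.List.pyRange (i + 1) ((data.length : Int) + 1) 1) with
    | some j => [i, j + 1] :: group_adapt_go data nmin (j + 1)
    | none => []  -- unreachable: the range ends at len(data), where 'j + 1 >= len(data)' breaks
  else []
termination_by ((data.length : Int) + 2 - i).toNat
decreasing_by
  have hm := groupA_find_mem data nmin i _ j _hf
  rw [PySem.List.mem_pyRange_one] at hm
  omega

def group_adapt (data : List Int) (nmin : Int) : List (List Int) :=
  group_adapt_go data nmin 0

-- ===== PORT B =====
-- inner 'while j + 1 < n and s + data[j] < nmin: s += data[j]; j += 1' of Source B; returns final j.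
-- pyGetD with default 0 is exact here: every call has 0 ≤ j < n.
def groupB_find (data : List Int) (nmin : Int) (s j : Int) : Int :=
  if j + 1 < (data.length : Int) ∧ s + PySem.List.pyGetD data j 0 < nmin
  then groupB_find data nmin (s + PySem.List.pyGetD data j 0) (j + 1)
  else j
termination_by ((data.length : Int) - j).toNat
decreasing_by omega

-- needed by the termination argument of B's outer while-loop below
theorem groupB_find_le (data : List Int) (nmin : Int) (s j : Int) :
    j ≤ groupB_find data nmin s j := by
  unfold groupB_find
  split
  · have := groupB_find_le data nmin (s + PySem.List.pyGetD data j 0) (j + 1)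
    omega
  · omega
termination_by ((data.length : Int) - j).toNat
decreasing_by omega

-- outer 'while i < n' loop of Source B
def group_adapt_alt_go (data : List Int) (nmin : Int) (i : Int) : List (List Int) :=
  if _h : i < (data.length : Int) then
    let j := groupB_find data nmin (PySem.List.pyGetD data i 0) (i + 1)
    [i, j + 1] :: group_adapt_alt_go data nmin (j + 1)
  else []
termination_by ((data.length : Int) + 2 - i).toNat
decreasing_by
  have := groupB_find_le data nmin (PySem.List.pyGetD data i 0) (i + 1)
  omega

def group_adapt_alt (data : List Int) (nmin : Int) : List (List Int) :=
  group_adapt_alt_go data nmin 0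

-- ===== PRECONDITION & SPEC =====
def Spec_group_adapt (data : List Int) (nmin : Int) (out : List (List Int)) : Prop := out = group_adapt_alt data nmin
instance (data : List Int) (nmin : Int) (out : List (List Int)) : Decidable (Spec_group_adapt data nmin out) := by unfold Spec_group_adapt; infer_instance

-- ===== CLAIM (what is proved, stated in full; the proofs are below) =====
def Claim_equal_group_adapt : Prop := ∀ (data : List Int) (nmin : Int), Dom_group_adapt data nmin → Spec_group_adapt data nmin (group_adapt data nmin)

-- ===== LEMMAS AND PROOFS =====

-- extending a slice by one element on the right
theorem slice_snoc (data : List Int) (i j : Int) (hi : 0 ≤ i) (hij : i ≤ j)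
    (hj : j < (data.length : Int)) :
    PySem.List.slice data (some i) (some (j + 1))
      = PySem.List.slice data (some i) (some j) ++ [PySem.List.pyGetD data j 0] := by
  rw [PySem.List.slice_toNat data hi (by omega), PySem.List.slice_toNat data hi (by omega),
      PySem.List.pyGetD_eq_getElem data 0 (by omega) hj]
  have h1 : (j + 1).toNat - i.toNat = (j.toNat - i.toNat) + 1 := by omega
  rw [h1, List.take_add_one]
  congr 1
  rw [List.getElem?_drop]
  have h2 : i.toNat + (j.toNat - i.toNat) = j.toNat := by omega
  rw [h2, List.getElem?_eq_getElem (by omega)]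
  rfl

-- the two inner loops agree: A's break index equals B's final j, given that s is the window sum
theorem find_agree (data : List Int) (nmin : Int) (i j0 : Int)
    (hi : 0 ≤ i) (hij : i < j0) (hj : j0 ≤ (data.length : Int)) :
    groupA_find data nmin i (PySem.List.pyRange j0 ((data.length : Int) + 1) 1)
      = some (groupB_find data nmin (PySem.List.slice data (some i) (some j0)).sum j0) := by
  rw [PySem.List.pyRange_one_cons (by omega : j0 < (data.length : Int) + 1)]
  unfold groupA_find groupB_find
  by_cases hc : j0 + 1 < (data.length : Int) ∧
      (PySem.List.slice data (some i) (some j0)).sum + PySem.List.pyGetD data j0 0 < nmin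
  · -- B continues; A's break condition is false
    have hsum := slice_snoc data i j0 hi (by omega) (by omega)
    have hcond : ¬ ((PySem.List.slice data (some i) (some (j0 + 1))).sum ≥ nmin ∨
        j0 + 1 ≥ (data.length : Int)) := by
      rw [hsum]; simp only [List.sum_append, List.sum_cons, List.sum_nil]; omega
    rw [if_neg hcond, if_pos hc]
    have hrec := find_agree data nmin i (j0 + 1) hi (by omega) (by omega)
    rw [hsum] at hrec
    simpa using hrec
  · -- B stops; A breaks here too
    have hcond : (PySem.List.slice data (some i) (some (j0 + 1))).sum ≥ nmin ∨
        j0 + 1 ≥ (data.length : Int) := by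
      by_cases hend : j0 + 1 ≥ (data.length : Int)
      · exact Or.inr hend
      · left
        have hsum := slice_snoc data i j0 hi (by omega) (by omega)
        rw [hsum]; simp only [List.sum_append, List.sum_cons, List.sum_nil]; omega
    rw [if_pos hcond, if_neg hc]
termination_by ((data.length : Int) + 1 - j0).toNat
decreasing_by omega

-- singleton slice: the initial window sum s = data[i]
theorem slice_single_sum (data : List Int) (i : Int) (hi : 0 ≤ i) (hn : i < (data.length : Int)) :
    (PySem.List.slice data (some i) (some (i + 1))).sum = PySem.List.pyGetD data i 0 := by
  rw [slice_snoc data i i hi le_rfl hn, PySem.List.slice_toNat data hi hi]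
  simp

-- the two outer loops agree
theorem go_agree (data : List Int) (nmin : Int) (i : Int) (hi : 0 ≤ i) :
    group_adapt_go data nmin i = group_adapt_alt_go data nmin i := by
  unfold group_adapt_go group_adapt_alt_go
  by_cases h : i < (data.length : Int)
  · rw [dif_pos h, dif_pos h]
    have hf := find_agree data nmin i (i + 1) hi (by omega) (by omega)
    rw [slice_single_sum data i hi h] at hf
    have _hle := groupB_find_le data nmin (PySem.List.pyGetD data i 0) (i + 1)
    split
    · next j heq =>
      rw [hf] at heq
      injection heq with hj
      subst hj
      show _ = [i, groupB_find data nmin (PySem.List.pyGetD data i 0) (i + 1) + 1] ::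
        group_adapt_alt_go data nmin (groupB_find data nmin (PySem.List.pyGetD data i 0) (i + 1) + 1)
      rw [go_agree data nmin (groupB_find data nmin (PySem.List.pyGetD data i 0) (i + 1) + 1)
        (by omega)]
    · next heq =>
      rw [hf] at heq
      exact absurd heq (by simp)
  · rw [dif_neg h, dif_neg h]
termination_by ((data.length : Int) + 2 - i).toNat
decreasing_by
  omega

-- ===== VERDICT (by name: the statement is the Claim_ definition above) =====
theorem group_adapt_spec : Claim_equal_group_adapt := by
  intro data nmin _
  unfold Spec_group_adapt group_adapt group_adapt_alt
  exact go_agree data nmin 0 le_rfl
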